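-- pv_equiv track=rewrite | github.com/duongbinh2k1/cicd-orchestrator | src/cicd_orchestrator/prompts/context_builders.py | build_error_context
-- ===== SOURCE A (Python) =====
-- def build_error_context(log_content, max_lines=100):
--     """Extract and format error context from log content."""
--     if not log_content:
--         return "No log content available"
--
--     lines = log_content.split('\n')
--
--     # If log is short, return as-is
--     if len(lines) <= max_lines:
--         return log_content
--
--     # Find error indicators
--     error_patterns = [
--         'error:', 'Error:', 'ERROR:', 'FAILED:', 'failed:',
--         'exception:', 'Exception:', 'EXCEPTION:',
--         'fatal:', 'Fatal:', 'FATAL:',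
--         'build failed', 'test failed', 'compilation failed'
--     ]
--
--     error_lines = []
--     for i, line in enumerate(lines):
--         if any(pattern in line for pattern in error_patterns):
--             # Include context around error
--             start = max(0, i - 5)
--             end = min(len(lines), i + 10)
--             error_lines.extend(range(start, end))
--
--     if error_lines:
--         # Remove duplicates and sort
--         error_lines = sorted(set(error_lines))
--         context_lines = []
--
--         prev_line = -1
--         for line_num in error_lines:
--             if line_num > prev_line + 1:
--                 context_lines.append("... [context gap] ...")
--             context_lines.append(f"{line_num + 1:4d}: {lines[line_num]}")
--             prev_line = line_num
--
--         return "\n".join(context_lines)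
--     else:
--         # No specific errors found, return last portion
--         return "\n".join(lines[-max_lines:])
-- ===== SOURCE B (Python) =====
-- def build_error_context(log_content, max_lines=100):
--     """Extract and format error context from log content (coverage-mask single sweep)."""
--     if not log_content:
--         return "No log content available"
--
--     lines = log_content.split('\n')
--
--     if len(lines) <= max_lines:
--         return log_content
--
--     error_patterns = [
--         'error:', 'Error:', 'ERROR:', 'FAILED:', 'failed:',
--         'exception:', 'Exception:', 'EXCEPTION:',
--         'fatal:', 'Fatal:', 'FATAL:',
--         'build failed', 'test failed', 'compilation failed'
--     ]
--
--     n = len(lines)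
--     hits = [i for i, line in enumerate(lines)
--             if any(p in line for p in error_patterns)]
--
--     if not hits:
--         return "\n".join(lines[-max_lines:])
--
--     included = [any(i - 5 <= j < i + 10 for i in hits) for j in range(n)]
--
--     out = []
--     prev = -1
--     for j in range(n):
--         if included[j]:
--             if j > prev + 1:
--                 out.append("... [context gap] ...")
--             out.append(f"{j + 1:4d}: {lines[j]}")
--             prev = j
--     return "\n".join(out)
-- ===== Notes on version B (the rewrite author's own statement) =====
-- stated objective: alternative
-- what changed: B replaces A's build-a-list-of-indices-then-sorted(set(...)) pipeline by a coverage test: it collects the matching line indices once, then sweeps the line numbers 0..n-1 in order emitting a line exactly when some hit covers it, so no duplicate list, no set and no sort are ever built.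
import Mathlib
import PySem

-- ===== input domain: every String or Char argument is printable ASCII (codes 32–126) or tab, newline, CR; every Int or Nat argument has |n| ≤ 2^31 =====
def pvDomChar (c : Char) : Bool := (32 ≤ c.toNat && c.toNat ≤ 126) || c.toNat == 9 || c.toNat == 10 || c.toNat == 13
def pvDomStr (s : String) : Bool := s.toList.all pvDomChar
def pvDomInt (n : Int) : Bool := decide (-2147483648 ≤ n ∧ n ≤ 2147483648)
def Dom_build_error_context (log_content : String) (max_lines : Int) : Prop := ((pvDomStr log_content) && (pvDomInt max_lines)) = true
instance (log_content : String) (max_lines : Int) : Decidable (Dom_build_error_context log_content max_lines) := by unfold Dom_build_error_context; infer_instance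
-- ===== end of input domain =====

-- One honest line: B replaces A's list-of-indices + sorted(set(...)) pipeline by an ordered
-- coverage sweep over the line numbers (collect hit indices once, emit j iff some hit covers it);
-- same return value everywhere, no set and no sort.

-- ===== PORT A =====
-- shared with B (both Pythons carry the identical pattern list and f-string)
def errPatterns : List String :=
  ["error:", "Error:", "ERROR:", "FAILED:", "failed:",
   "exception:", "Exception:", "EXCEPTION:",
   "fatal:", "Fatal:", "FATAL:",
   "build failed", "test failed", "compilation failed"]

def lineMatches (line : String) : Bool := errPatterns.any (fun p => PySem.Str.isIn p line)

-- f"{num:4d}: {line}" : right-align str(num) in width 4 with spaces (hand-ported, exact for width-4 'd')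
def fmtLine (num : Int) (line : String) : String :=
  String.ofList (List.replicate (4 - (PySem.Int.toChars num).length) ' ' ++ PySem.Int.toChars num ++ ':' :: ' ' :: line.toList)

-- the shared loop body "append gap marker if needed, append formatted line, remember prev"
def emitStep (lines : List String) (st : List String × Int) (j : Int) : List String × Int :=
  let ctx := if j > st.2 + 1 then st.1 ++ ["... [context gap] ..."] else st.1
  (ctx ++ [fmtLine (j + 1) (PySem.List.pyGetD lines j "")], j)

def build_error_context (log_content : String) (max_lines : Int) : String :=
  if log_content.toList = [] then "No log content available"
  else
    let lines := (PySem.Str.split? log_content "\n").getD []  -- sep "\n" ≠ "", so split? is always some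
    if (lines.length : Int) ≤ max_lines then log_content
    else
      let error_lines : List Int := (PySem.List.enumerate lines 0).foldl
        (fun acc p =>
          if lineMatches p.2 then
            acc ++ PySem.List.pyRange (max 0 (p.1 - 5)) (min (lines.length : Int) (p.1 + 10)) 1
          else acc) []
      if error_lines ≠ [] then
        let sortedL := PySem.List.sorted (PySem.Set.ofList error_lines) (fun x => x) false
        PySem.Str.join "\n" (sortedL.foldl (emitStep lines) ([], -1)).1
      else
        PySem.Str.join "\n" (PySem.List.slice lines (some (-max_lines)) none)

-- ===== PORT B =====
def build_error_context_alt (log_content : String) (max_lines : Int) : String :=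
  if log_content.toList = [] then "No log content available"
  else
    let lines := (PySem.Str.split? log_content "\n").getD []  -- sep "\n" ≠ "", so split? is always some
    if (lines.length : Int) ≤ max_lines then log_content
    else
      let n : Int := lines.length
      let hits : List Int := ((PySem.List.enumerate lines 0).filter (fun p => lineMatches p.2)).map (·.1)
      if hits.isEmpty then
        PySem.Str.join "\n" (PySem.List.slice lines (some (-max_lines)) none)
      else
        let included : List Bool :=
          (PySem.List.pyRange 0 n 1).map (fun j => hits.any (fun i => decide (i - 5 ≤ j) && decide (j < i + 10)))
        PySem.Str.join "\n"
          ((PySem.List.pyRange 0 n 1).foldl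
            (fun st j => if PySem.List.pyGetD included j false then emitStep lines st j else st)
            ([], -1)).1

-- ===== PRECONDITION & SPEC =====
def Spec_build_error_context (log_content : String) (max_lines : Int) (out : String) : Prop := out = build_error_context_alt log_content max_lines
instance (log_content : String) (max_lines : Int) (out : String) : Decidable (Spec_build_error_context log_content max_lines out) := by unfold Spec_build_error_context; infer_instance

-- ===== CLAIM (what is proved, stated in full; the proofs are below) =====
def Claim_equal_build_error_context : Prop := ∀ (log_content : String) (max_lines : Int), Dom_build_error_context log_content max_lines → Spec_build_error_context log_content max_lines (build_error_context log_content max_lines)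

-- ===== LEMMAS AND PROOFS =====

-- A's error_lines accumulator, B's hits list and B's coverage filter, as standalone terms
def aErr (lines : List String) : List Int :=
  (PySem.List.enumerate lines 0).foldl
    (fun acc p =>
      if lineMatches p.2 then
        acc ++ PySem.List.pyRange (max 0 (p.1 - 5)) (min (lines.length : Int) (p.1 + 10)) 1
      else acc) []

def bHits (lines : List String) : List Int :=
  ((PySem.List.enumerate lines 0).filter (fun p => lineMatches p.2)).map (·.1)

def bCov (lines : List String) : List Int :=
  (PySem.List.pyRange 0 (lines.length : Int) 1).filter
    (fun j => (bHits lines).any (fun i => decide (i - 5 ≤ j) && decide (j < i + 10)))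

lemma aErr_eq_flatMap (lines : List String) :
    aErr lines = (PySem.List.enumerate lines 0).flatMap
      (fun p => if lineMatches p.2 then
          PySem.List.pyRange (max 0 (p.1 - 5)) (min (lines.length : Int) (p.1 + 10)) 1
        else []) := by
  unfold aErr
  rw [PySem.List.foldl_congr_mem _ _
      (fun acc p => acc ++ (if lineMatches p.2 then
          PySem.List.pyRange (max 0 (p.1 - 5)) (min (lines.length : Int) (p.1 + 10)) 1
        else [])) _
      (by intro acc p _; by_cases hm : lineMatches p.2 <;> simp [hm])]
  rw [PySem.List.foldl_append_eq_flatMap]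
  simp

lemma mem_aErr (lines : List String) (j : Int) :
    j ∈ aErr lines ↔ ∃ (k : Nat) (h : k < lines.length),
      lineMatches lines[k] = true ∧ max 0 ((k : Int) - 5) ≤ j ∧ j < min (lines.length : Int) ((k : Int) + 10) := by
  rw [aErr_eq_flatMap]
  simp only [List.mem_flatMap, PySem.List.mem_enumerate_iff]
  constructor
  · rintro ⟨p, ⟨k, h, rfl⟩, hj⟩
    simp only [zero_add] at hj
    by_cases hm : lineMatches lines[k] = true
    · rw [if_pos hm, PySem.List.mem_pyRange_one] at hj
      exact ⟨k, h, hm, hj.1, hj.2⟩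
    · rw [if_neg hm] at hj; cases hj
  · rintro ⟨k, h, hm, h1, h2⟩
    refine ⟨((k : Int), lines[k]), ⟨k, h, by simp⟩, ?_⟩
    rw [if_pos hm, PySem.List.mem_pyRange_one]
    exact ⟨h1, h2⟩

lemma mem_bHits (lines : List String) (i : Int) :
    i ∈ bHits lines ↔ ∃ (k : Nat) (h : k < lines.length),
      lineMatches lines[k] = true ∧ i = (k : Int) := by
  unfold bHits
  simp only [List.mem_map, List.mem_filter, PySem.List.mem_enumerate_iff]
  constructor
  · rintro ⟨p, ⟨⟨k, h, rfl⟩, hm⟩, rfl⟩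
    exact ⟨k, h, by simpa using hm, by simp⟩
  · rintro ⟨k, h, hm, rfl⟩
    exact ⟨((k : Int), lines[k]), ⟨⟨k, h, by simp⟩, hm⟩, rfl⟩

lemma mem_bCov (lines : List String) (j : Int) :
    j ∈ bCov lines ↔ j ∈ aErr lines := by
  unfold bCov
  simp only [List.mem_filter, PySem.List.mem_pyRange_one, List.any_eq_true, Bool.and_eq_true,
    decide_eq_true_eq, mem_aErr, mem_bHits]
  constructor
  · rintro ⟨⟨hj0, hjn⟩, i, hi, h1, h2⟩
    obtain ⟨k, h, hm, rfl⟩ := hi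
    exact ⟨k, h, hm, by omega, by omega⟩
  · rintro ⟨k, h, hm, h1, h2⟩
    have hkn : (k : Int) < (lines.length : Int) := by exact_mod_cast h
    exact ⟨⟨by omega, by omega⟩, (k : Int), ⟨k, h, hm, rfl⟩, by omega, by omega⟩

lemma aErr_nil_iff (lines : List String) : aErr lines = [] ↔ bHits lines = [] := by
  rw [List.eq_nil_iff_forall_not_mem, List.eq_nil_iff_forall_not_mem]
  constructor
  · intro ha i hi
    obtain ⟨k, h, hm, rfl⟩ := (mem_bHits lines i).1 hi
    have hkn : (k : Int) < (lines.length : Int) := by exact_mod_cast h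
    exact ha (k : Int) ((mem_aErr lines (k : Int)).2 ⟨k, h, hm, by omega, by omega⟩)
  · intro hh j hj
    obtain ⟨k, h, hm, _, _⟩ := (mem_aErr lines j).1 hj
    exact hh (k : Int) ((mem_bHits lines (k : Int)).2 ⟨k, h, hm, rfl⟩)

lemma sorted_aErr_eq_bCov (lines : List String) :
    PySem.List.sorted (PySem.Set.ofList (aErr lines)) (fun x => x) false = bCov lines := by
  unfold bCov
  apply PySem.List.sorted_eq_of_perm_of_pairwise_lt _ _ _ ?_ ?_
  · rw [List.perm_ext_iff_of_nodup (List.Nodup.filter _ (PySem.List.nodup_pyRange_one 0 _))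
      (PySem.Set.nodup_ofList _)]
    intro j
    rw [PySem.Set.mem_ofList]
    exact (bCov.eq_def lines ▸ mem_bCov lines j)
  · exact List.Pairwise.filter _ (PySem.List.pairwise_lt_pyRange_one 0 _)

lemma bSweep_eq (lines : List String) :
    ((PySem.List.pyRange 0 (lines.length : Int) 1).foldl
      (fun st j => if PySem.List.pyGetD
          ((PySem.List.pyRange 0 (lines.length : Int) 1).map
            (fun j => (bHits lines).any (fun i => decide (i - 5 ≤ j) && decide (j < i + 10)))) j false
        then emitStep lines st j else st)
      ([], -1))
    = (bCov lines).foldl (emitStep lines) ([], -1) := by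
  rw [PySem.List.foldl_congr_mem _ _
      (fun st j => if (bHits lines).any (fun i => decide (i - 5 ≤ j) && decide (j < i + 10))
        then emitStep lines st j else st) _
      (by
        intro st j hj
        rw [PySem.List.mem_pyRange_one] at hj
        rw [PySem.List.pyGetD_map_pyRange_of_nonneg _ _ _ _ hj.1 hj.2])]
  rw [PySem.List.foldl_if_eq_foldl_filter]
  rfl

lemma branch_eq (lines : List String) (X : String) :
    (if aErr lines ≠ [] then
       PySem.Str.join "\n" ((PySem.List.sorted (PySem.Set.ofList (aErr lines)) (fun x => x) false).foldl (emitStep lines) ([], -1)).1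
     else X)
    = (if (bHits lines).isEmpty then X
       else PySem.Str.join "\n"
        ((PySem.List.pyRange 0 (lines.length : Int) 1).foldl
          (fun st j => if PySem.List.pyGetD
              ((PySem.List.pyRange 0 (lines.length : Int) 1).map
                (fun j => (bHits lines).any (fun i => decide (i - 5 ≤ j) && decide (j < i + 10)))) j false
            then emitStep lines st j else st)
          ([], -1)).1) := by
  by_cases hh : bHits lines = []
  · rw [if_neg (by simp [aErr_nil_iff, hh]), if_pos (by simp [hh])]
  · rw [if_pos (by simp [aErr_nil_iff]; exact hh), if_neg (by simp [hh])]
    rw [sorted_aErr_eq_bCov, ← bSweep_eq]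

-- ===== VERDICT (by name: the statement is the Claim_ definition above) =====
theorem build_error_context_spec : Claim_equal_build_error_context := by
  intro log ml _
  unfold Spec_build_error_context build_error_context build_error_context_alt
  by_cases h0 : log.toList = []
  · simp only [if_pos h0]
  · simp only [if_neg h0]
    by_cases h1 : (((PySem.Str.split? log "\n").getD []).length : Int) ≤ ml
    · simp only [if_pos h1]
    · simp only [if_neg h1]
      have hb := branch_eq ((PySem.Str.split? log "\n").getD [])
        (PySem.Str.join "\n" (PySem.List.slice ((PySem.Str.split? log "\n").getD []) (some (-ml)) none))
      rw [aErr, bHits] at hb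
      exact hb
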